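-- pv_equiv track=rewrite | github.com/lbhsos/AlgoStudy | 2step_python/simulation/home_security.py | get_service_area
-- ===== SOURCE A (Python) =====
-- from collections import deque
--
-- def get_service_area(k):
--     length = 2*k - 1
--     mask = [[0] * length for _ in range(length)]
--     mask[k-1][k-1] = -1
--     q = deque()
--     q.append([k-1,k-1])
--     q.append(None)
--     positions = [[0,+1],[0,-1],[+1,0],[-1,0]]
--     count = 1 # q의 depth 조사
--     mask_size = 1
--     while q:
--         cur = q.popleft()
--
--         if cur == None:
--             count += 1
--             q.append(None)
--             cur = q[0]
--             if count == k:
--                 break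
--             if cur == None:
--                 break
--             else:
--                 cur = q.popleft()
--
--         cur_i, cur_j = cur[0], cur[1]
--         for pos in positions:
--             new_i = cur_i + pos[0]
--             new_j = cur_j + pos[1]
--             if new_i < length and new_i > -1 and new_j < length and new_j > -1:
--                 if mask[new_i][new_j] == 0:
--                     mask[new_i][new_j] = -1
--                     mask_size += 1
--                     q.append([new_i, new_j])
--
--     return mask, mask_size
-- ===== SOURCE B (Python) =====
-- def get_service_area(k):
--     length = 2*k - 1
--     c = k - 1
--     mask = [[-1 if abs(i - c) + abs(j - c) <= c else 0 for j in range(length)]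
--             for i in range(length)]
--     count = sum(row.count(-1) for row in mask)
--     return mask, count
-- ===== Notes on version B (the rewrite author's own statement) =====
-- stated objective: simpler
-- what changed: Replaces the deque-based BFS flood fill with layer counting by a direct comprehension that marks each cell whose Manhattan distance from the center is at most k-1 and counts the marked cells.
-- outside the precondition, e.g. on get_service_area(0): A raises IndexError, B returns ([], 0)
import Mathlib
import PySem

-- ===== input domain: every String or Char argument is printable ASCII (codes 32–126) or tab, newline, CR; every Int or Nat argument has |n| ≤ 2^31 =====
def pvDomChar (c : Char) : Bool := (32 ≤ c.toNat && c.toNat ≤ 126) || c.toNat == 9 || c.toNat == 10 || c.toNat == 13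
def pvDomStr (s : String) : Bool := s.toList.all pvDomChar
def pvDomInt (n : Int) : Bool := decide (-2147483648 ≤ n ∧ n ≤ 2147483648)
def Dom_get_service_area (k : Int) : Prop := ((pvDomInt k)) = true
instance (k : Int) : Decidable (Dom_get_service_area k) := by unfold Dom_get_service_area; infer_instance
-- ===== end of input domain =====

-- B replaces A's deque-based BFS flood fill by a direct Manhattan-distance comprehension (same O(k^2) cost, simpler); A raises IndexError for k ≤ 0, excluded by Pre_, where B returns ([], 0).


-- ===== PORT A =====
-- mask[i][j] read/write at indices the code has already checked to be in range
def pvGetCell (mask : List (List Int)) (i j : Int) : Int :=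
  (mask.getD i.toNat []).getD j.toNat 0

def pvSetCell (mask : List (List Int)) (i j : Int) (v : Int) : List (List Int) :=
  mask.set i.toNat ((mask.getD i.toNat []).set j.toNat v)

-- positions = [[0,+1],[0,-1],[+1,0],[-1,0]]
def pvPositions : List (Int × Int) := [(0,1), (0,-1), (1,0), (-1,0)]

-- body of A's `for pos in positions` loop: conditionally mark and enqueue one neighbour
def pvVisit1 (length : Int) (cur : Int × Int)
    (st : List (List Int) × List (Option (Int × Int)) × Int) (pos : Int × Int) :
    List (List Int) × List (Option (Int × Int)) × Int :=
  let ni := cur.1 + pos.1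
  let nj := cur.2 + pos.2
  if ni < length ∧ -1 < ni ∧ nj < length ∧ -1 < nj then
    if pvGetCell st.1 ni nj = 0 then
      (pvSetCell st.1 ni nj (-1), st.2.1 ++ [some (ni, nj)], st.2.2 + 1)
    else st
  else st

def pvVisit (length : Int) (st : List (List Int) × List (Option (Int × Int)) × Int)
    (cur : Int × Int) : List (List Int) × List (Option (Int × Int)) × Int :=
  pvPositions.foldl (pvVisit1 length cur) st

-- A's `while q` loop; fuel only makes the recursion structural (one unit per iteration,
-- the initial fuel is large enough — proved below), queue `None` sentinel = Option.none
def pvLoop (k length : Int) :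
    Nat → List (List Int) → List (Option (Int × Int)) → Int → Int → List (List Int) × Int
  | 0, mask, _, _, size => (mask, size)
  | fuel+1, mask, q, count, size =>
    match q with
    | [] => (mask, size)
    | none :: q' =>
      let count := count + 1
      let q2 := q' ++ [none]
      if count = k then (mask, size)
      else
        match q2 with
        | [] => (mask, size)              -- unreachable (q2 ends with the sentinel)
        | none :: _ => (mask, size)
        | some cur :: q3 =>
          match pvVisit length (mask, q3, size) cur with
          | (mask', q4, size') => pvLoop k length fuel mask' q4 count size'
    | some cur :: q' =>
      match pvVisit length (mask, q', size) cur with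
      | (mask', q4, size') => pvLoop k length fuel mask' q4 count size'

def get_service_area (k : Int) : List (List Int) × Int :=
  let length := 2*k - 1
  let mask := List.replicate length.toNat (List.replicate length.toNat (0 : Int))
  if 1 ≤ k then
    pvLoop k length (4*k*k*k + 2*k + 8).toNat
      (pvSetCell mask (k-1) (k-1) (-1)) [some (k-1, k-1), none] 1 1
  else ([], 0)      -- Python raises IndexError here (empty grid, mask[k-1] fails): outside Pre_

-- ===== PORT B =====
def get_service_area_alt (k : Int) : List (List Int) × Int :=
  let length := 2*k - 1
  let c := k - 1
  let mask := (List.range length.toNat).map (fun (i : Nat) =>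
    (List.range length.toNat).map (fun (j : Nat) =>
      if |(i : Int) - c| + |(j : Int) - c| ≤ c then (-1 : Int) else 0))
  (mask, (mask.map (fun row => (PySem.List.count row (-1) : Int))).sum)

-- ===== PRECONDITION & SPEC =====
-- Pre_ excludes exactly k ≤ 0, where A raises IndexError (mask is empty and mask[k-1] fails)
def Pre_get_service_area (k : Int) : Prop := 1 ≤ k
instance (k : Int) : Decidable (Pre_get_service_area k) := by unfold Pre_get_service_area; infer_instance

def pvWitness_get_service_area : Int := 3

def Spec_get_service_area (k : Int) (out : List (List Int) × Int) : Prop := out = get_service_area_alt k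
instance (k : Int) (out : List (List Int) × Int) : Decidable (Spec_get_service_area k out) := by unfold Spec_get_service_area; infer_instance

-- ===== CLAIM (what is proved, stated in full; the proofs are below) =====
def Claim_equal_get_service_area : Prop := ∀ (k : Int), Dom_get_service_area k → Pre_get_service_area k → Spec_get_service_area k (get_service_area k)

-- ===== LEMMAS AND PROOFS =====

-- Manhattan distance to the grid centre (c, c) with c = k-1, as an Int via natAbs (omega-friendly)
def pvDist (k : Int) (p : Int × Int) : Int :=
  ((p.1 - (k-1)).natAbs : Int) + ((p.2 - (k-1)).natAbs : Int)

def pvInGrid (k : Int) (p : Int × Int) : Prop :=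
  0 ≤ p.1 ∧ p.1 < 2*k - 1 ∧ 0 ≤ p.2 ∧ p.2 < 2*k - 1

def pvGrid (n : Nat) (m : Int → Int → Bool) : List (List Int) :=
  (List.range n).map (fun (i : Nat) => (List.range n).map (fun (j : Nat) =>
    if m (i : Int) (j : Int) then (-1 : Int) else 0))

def pvCnt (n : Nat) (m : Int → Int → Bool) : Int :=
  ((List.range n).map (fun (i : Nat) =>
    ((List.range n).map (fun (j : Nat) => if m (i : Int) (j : Int) then (1 : Int) else 0)).sum)).sum

def pvUpd (m : Int → Int → Bool) (a b : Int) : Int → Int → Bool :=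
  fun i j => if i = a ∧ j = b then true else m i j


-- ----- basic grid lemmas -----

theorem pvReplicate_eq_grid (n : Nat) :
    List.replicate n (List.replicate n (0 : Int)) = pvGrid n (fun _ _ => false) := by
  simp [pvGrid]

theorem pvSet_map_range {α : Type} (n t : Nat) (g : Nat → α) (v : α) :
    ((List.range n).map g).set t v = (List.range n).map (fun j => if j = t then v else g j) := by
  apply List.ext_getElem
  · simp
  · intro i h1 h2
    rw [List.getElem_set]
    by_cases hti : t = i
    · subst hti
      rw [if_pos rfl, List.getElem_map, List.getElem_range, if_pos rfl]
    · rw [if_neg hti, List.getElem_map, List.getElem_range, List.getElem_map, List.getElem_range,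
        if_neg (fun hh => hti hh.symm)]

theorem pvGrid_row (n : Nat) (m : Int → Int → Bool) (i : Nat) (h : i < n) :
    (pvGrid n m).getD i [] = (List.range n).map (fun (j : Nat) => if m (i : Int) (j : Int) then (-1 : Int) else 0) := by
  unfold pvGrid
  rw [List.getD_eq_getElem _ _ (by simp [h]), List.getElem_map, List.getElem_range]

theorem pvGetCell_grid (n : Nat) (m : Int → Int → Bool) (a b : Int)
    (ha0 : 0 ≤ a) (ha : a < n) (hb0 : 0 ≤ b) (hb : b < n) :
    pvGetCell (pvGrid n m) a b = if m a b then -1 else 0 := by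
  have ha' : (a.toNat : Int) = a := Int.toNat_of_nonneg ha0
  have hb' : (b.toNat : Int) = b := Int.toNat_of_nonneg hb0
  unfold pvGetCell
  rw [pvGrid_row n m a.toNat (by omega),
    List.getD_eq_getElem _ _ (by simp; omega), List.getElem_map, List.getElem_range, ha', hb']

theorem pvSetCell_grid (n : Nat) (m : Int → Int → Bool) (a b : Int)
    (ha0 : 0 ≤ a) (ha : a < n) (hb0 : 0 ≤ b) (hb : b < n) :
    pvSetCell (pvGrid n m) a b (-1) = pvGrid n (pvUpd m a b) := by
  have ha' : (a.toNat : Int) = a := Int.toNat_of_nonneg ha0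
  have hb' : (b.toNat : Int) = b := Int.toNat_of_nonneg hb0
  unfold pvSetCell
  rw [pvGrid_row n m a.toNat (by omega), pvSet_map_range]
  conv_lhs => rw [pvGrid]
  rw [pvSet_map_range]
  unfold pvGrid
  apply List.map_congr_left
  intro i hi
  simp only [List.mem_range] at hi
  by_cases hia : i = a.toNat
  · subst hia
    rw [if_pos rfl]
    apply List.map_congr_left
    intro j hj
    simp only [List.mem_range] at hj
    by_cases hjb : j = b.toNat
    · subst hjb
      simp [pvUpd, ha', hb']
    · have hjb' : (j : Int) ≠ b := by omega
      simp [pvUpd, hjb, hjb']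
  · have hia' : (i : Int) ≠ a := by omega
    rw [if_neg hia]
    apply List.map_congr_left
    intro j hj
    simp [pvUpd, hia']

theorem pvGrid_congr (n : Nat) (m m' : Int → Int → Bool)
    (h : ∀ i j : Int, 0 ≤ i → i < n → 0 ≤ j → j < n → m i j = m' i j) :
    pvGrid n m = pvGrid n m' := by
  unfold pvGrid
  apply List.map_congr_left
  intro i hi
  simp only [List.mem_range] at hi
  apply List.map_congr_left
  intro j hj
  simp only [List.mem_range] at hj
  rw [h i j (by omega) (by omega) (by omega) (by omega)]

theorem pvCnt_congr (n : Nat) (m m' : Int → Int → Bool)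
    (h : ∀ i j : Int, 0 ≤ i → i < n → 0 ≤ j → j < n → m i j = m' i j) :
    pvCnt n m = pvCnt n m' := by
  unfold pvCnt
  congr 1
  apply List.map_congr_left
  intro i hi
  simp only [List.mem_range] at hi
  congr 1
  apply List.map_congr_left
  intro j hj
  simp only [List.mem_range] at hj
  rw [h i j (by omega) (by omega) (by omega) (by omega)]

theorem pvSum_update (l : List Nat) (hnd : l.Nodup) (g g' : Nat → Int) (a : Nat) (hal : a ∈ l)
    (hne : ∀ x ∈ l, x ≠ a → g' x = g x) (hga : g' a = g a + 1) :
    (l.map g').sum = (l.map g).sum + 1 := by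
  induction l with
  | nil => simp at hal
  | cons x t ih =>
    simp only [List.map_cons, List.sum_cons]
    by_cases hxa : x = a
    · subst hxa
      have hnotin : x ∉ t := (List.nodup_cons.mp hnd).1
      have ht : t.map g' = t.map g :=
        List.map_congr_left (fun y hy => hne y (List.mem_cons_of_mem _ hy) (fun h => hnotin (h ▸ hy)))
      rw [ht, hga]; ring
    · have hat : a ∈ t := by
        rcases List.mem_cons.mp hal with h | h
        · exact absurd h.symm hxa
        · exact h
      rw [hne x (by simp) hxa,
          ih (List.nodup_cons.mp hnd).2 hat (fun y hy => hne y (List.mem_cons_of_mem _ hy))]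
      ring

theorem pvCnt_upd (n : Nat) (m : Int → Int → Bool) (a b : Int)
    (ha0 : 0 ≤ a) (ha : a < n) (hb0 : 0 ≤ b) (hb : b < n) (hm : m a b = false) :
    pvCnt n (pvUpd m a b) = pvCnt n m + 1 := by
  have ha' : (a.toNat : Int) = a := Int.toNat_of_nonneg ha0
  have hb' : (b.toNat : Int) = b := Int.toNat_of_nonneg hb0
  unfold pvCnt
  apply pvSum_update (List.range n) (List.nodup_range) _ _ a.toNat
    (List.mem_range.mpr (by omega))
  · intro x hx hxa
    have hx' : (x : Int) ≠ a := by simp only [List.mem_range] at hx; omega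
    congr 1
    apply List.map_congr_left
    intro j hj
    simp [pvUpd, hx']
  · apply pvSum_update (List.range n) (List.nodup_range) _ _ b.toNat
      (List.mem_range.mpr (by omega))
    · intro x hx hxb
      have hx' : (x : Int) ≠ b := by simp only [List.mem_range] at hx; omega
      simp [pvUpd, hx']
    · simp [pvUpd, ha', hb', hm]

theorem pvCnt_false (n : Nat) : pvCnt n (fun _ _ => false) = 0 := by
  simp [pvCnt]

theorem pvCount_row (l : List Nat) (f : Nat → Bool) :
    ((l.map (fun x => if f x then (-1 : Int) else 0)).count (-1) : Int)
      = (l.map (fun x => if f x then (1 : Int) else 0)).sum := by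
  induction l with
  | nil => simp
  | cons x t ih =>
    by_cases h : f x <;> simp [h] <;> push_cast [ih] <;> ring

theorem pvAlt_eq (k : Int) (hk : 1 ≤ k) :
    get_service_area_alt k
      = (pvGrid (2*k-1).toNat (fun i j => decide (pvDist k (i, j) ≤ k-1)),
         pvCnt (2*k-1).toNat (fun i j => decide (pvDist k (i, j) ≤ k-1))) := by
  unfold get_service_area_alt
  have hmask : (List.range (2*k-1).toNat).map (fun (i : Nat) =>
      (List.range (2*k-1).toNat).map (fun (j : Nat) =>
        if |(i : Int) - (k-1)| + |(j : Int) - (k-1)| ≤ k-1 then (-1 : Int) else 0))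
      = pvGrid (2*k-1).toNat (fun i j => decide (pvDist k (i, j) ≤ k-1)) := by
    unfold pvGrid
    apply List.map_congr_left
    intro i _
    apply List.map_congr_left
    intro j _
    simp only [pvDist, decide_eq_true_eq]
    congr 1
    rw [Int.abs_eq_natAbs, Int.abs_eq_natAbs]
  simp only []
  rw [hmask]
  refine Prod.ext rfl ?_
  simp only [PySem.List.count_eq]
  unfold pvGrid pvCnt
  rw [List.map_map]
  apply congrArg List.sum
  apply List.map_congr_left
  intro i _
  simp only [Function.comp]
  exact pvCount_row (List.range (2*k-1).toNat) (fun j => decide (pvDist k ((i : Int), (j : Int)) ≤ k-1))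

-- ----- geometry -----

theorem pvDist_eq_zero (k : Int) (p : Int × Int) : pvDist k p ≤ 0 ↔ p = (k-1, k-1) := by
  obtain ⟨a, b⟩ := p
  simp only [pvDist, Prod.ext_iff]
  omega

theorem pvInGrid_of_dist_le (k : Int) (hk : 1 ≤ k) (p : Int × Int)
    (h : pvDist k p ≤ k - 1) : pvInGrid k p := by
  obtain ⟨a, b⟩ := p
  simp only [pvDist] at h
  exact ⟨by omega, by omega, by omega, by omega⟩

theorem pvAdj_dist (k : Int) (p o : Int × Int) (ho : o ∈ pvPositions) :
    pvDist k (p.1 + o.1, p.2 + o.2) = pvDist k p + 1 ∨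
    pvDist k (p.1 + o.1, p.2 + o.2) + 1 = pvDist k p := by
  obtain ⟨a, b⟩ := p
  fin_cases ho <;> simp only [pvDist] <;> omega

theorem pvStep_toward (k : Int) (y : Int × Int) (e : Int) (he : 1 ≤ e) (hy : pvDist k y = e) :
    ∃ o ∈ pvPositions, pvDist k (y.1 - o.1, y.2 - o.2) = e - 1 := by
  obtain ⟨a, b⟩ := y
  simp only [pvDist] at hy
  rcases lt_trichotomy a (k-1) with h | h | h
  · exact ⟨(-1, 0), by simp [pvPositions], by simp only [pvDist]; omega⟩
  · rcases lt_trichotomy b (k-1) with h2 | h2 | h2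
    · exact ⟨(0, -1), by simp [pvPositions], by simp only [pvDist]; omega⟩
    · omega
    · exact ⟨(0, 1), by simp [pvPositions], by simp only [pvDist]; omega⟩
  · exact ⟨(1, 0), by simp [pvPositions], by simp only [pvDist]; omega⟩

theorem pvLength_le_sq (k : Int) (F : List (Int × Int)) (hnd : F.Nodup)
    (hg : ∀ p ∈ F, pvInGrid k p) : F.length ≤ (2*k-1).toNat * (2*k-1).toNat := by
  have hinj : ∀ x ∈ F, ∀ y ∈ F, (x.1.toNat, x.2.toNat) = (y.1.toNat, y.2.toNat) → x = y := by
    intro x hx y hy hxy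
    have hgx := hg x hx
    have hgy := hg y hy
    unfold pvInGrid at hgx hgy
    obtain ⟨x1, x2⟩ := x
    obtain ⟨y1, y2⟩ := y
    simp only [Prod.mk.injEq] at hxy ⊢
    omega
  have hnd2 : (F.map (fun p => (p.1.toNat, p.2.toNat))).Nodup := List.Nodup.map_on hinj hnd
  have hsub : (F.map (fun p => (p.1.toNat, p.2.toNat))).toFinset ⊆
      Finset.range (2*k-1).toNat ×ˢ Finset.range (2*k-1).toNat := by
    intro x hx
    simp only [List.mem_toFinset, List.mem_map] at hx
    obtain ⟨p, hp, rfl⟩ := hx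
    have hgp := hg p hp
    unfold pvInGrid at hgp
    simp only [Finset.mem_product, Finset.mem_range]
    constructor <;> omega
  calc F.length = (F.map (fun p => (p.1.toNat, p.2.toNat))).length := (List.length_map _).symm
    _ = (F.map (fun p => (p.1.toNat, p.2.toNat))).toFinset.card :=
        (List.toFinset_card_of_nodup hnd2).symm
    _ ≤ ((Finset.range (2*k-1).toNat) ×ˢ (Finset.range (2*k-1).toNat)).card :=
        Finset.card_le_card hsub
    _ = (2*k-1).toNat * (2*k-1).toNat := by
        rw [Finset.card_product, Finset.card_range]

-- ----- the BFS invariant -----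

structure pvInv (k : Int) (d : Nat) (pending fresh : List (Int × Int))
    (m : Int → Int → Bool) (size : Int) : Prop where
  hd : (d : Int) ≤ k - 2
  hpend : ∀ p ∈ pending, pvDist k p = (d : Int)
  hfresh : ∀ p ∈ fresh, pvDist k p = (d : Int) + 1 ∧ pvInGrid k p
  hnd : fresh.Nodup
  hm : ∀ i j : Int, pvInGrid k (i, j) → (m i j = true ↔ pvDist k (i, j) ≤ (d : Int) ∨ (i, j) ∈ fresh)
  hcomp : ∀ y : Int × Int, pvDist k y = (d : Int) + 1 → pvInGrid k y →
    (∃ o ∈ pvPositions, (y.1 - o.1, y.2 - o.2) ∉ pending ∧ pvDist k (y.1 - o.1, y.2 - o.2) = (d : Int)) →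
    y ∈ fresh
  hsz : size = pvCnt (2*k-1).toNat m

theorem pvVisit1_spec (k : Int) (hk : 1 ≤ k) (d : Int) (F : List (Int × Int))
    (m : Int → Int → Bool) (size : Int) (q : List (Option (Int × Int))) (cur pos : Int × Int)
    (hF : ∀ p ∈ F, pvDist k p = d + 1 ∧ pvInGrid k p) (hnd : F.Nodup)
    (hm : ∀ i j : Int, pvInGrid k (i, j) → (m i j = true ↔ pvDist k (i, j) ≤ d ∨ (i, j) ∈ F))
    (hsz : size = pvCnt (2*k-1).toNat m)
    (hy : pvDist k (cur.1 + pos.1, cur.2 + pos.2) = d + 1 ∨ pvDist k (cur.1 + pos.1, cur.2 + pos.2) ≤ d) :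
    ∃ (new : List (Int × Int)) (m2 : Int → Int → Bool) (size2 : Int),
      pvVisit1 (2*k-1) cur (pvGrid (2*k-1).toNat m, q, size) pos
        = (pvGrid (2*k-1).toNat m2, q ++ new.map some, size2) ∧
      (∀ p ∈ F ++ new, pvDist k p = d + 1 ∧ pvInGrid k p) ∧ (F ++ new).Nodup ∧
      (∀ i j : Int, pvInGrid k (i, j) → (m2 i j = true ↔ pvDist k (i, j) ≤ d ∨ (i, j) ∈ F ++ new)) ∧
      size2 = pvCnt (2*k-1).toNat m2 ∧
      (pvInGrid k (cur.1 + pos.1, cur.2 + pos.2) → pvDist k (cur.1 + pos.1, cur.2 + pos.2) = d + 1 →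
        (cur.1 + pos.1, cur.2 + pos.2) ∈ F ++ new) := by
  have hn : ((2*k-1).toNat : Int) = 2*k-1 := by omega
  by_cases hg : pvInGrid k (cur.1 + pos.1, cur.2 + pos.2)
  · obtain ⟨hg1, hg2, hg3, hg4⟩ := hg
    simp only [] at hg1 hg2 hg3 hg4
    have hget := pvGetCell_grid (2*k-1).toNat m (cur.1 + pos.1) (cur.2 + pos.2)
      (by omega) (by omega) (by omega) (by omega)
    by_cases hmk : m (cur.1 + pos.1) (cur.2 + pos.2) = true
    · -- neighbour already marked: state unchanged
      refine ⟨[], m, size, ?_, by simpa using hF, by simpa using hnd, by simpa using hm, hsz, ?_⟩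
      · unfold pvVisit1
        rw [if_pos ⟨by omega, by omega, by omega, by omega⟩]
        simp only []
        rw [hget, if_pos hmk, if_neg (by decide : ¬(-1 : Int) = 0)]
        simp
      · intro _ hdy
        rcases (hm _ _ ⟨hg1, hg2, hg3, hg4⟩).mp hmk with h1 | h2
        · omega
        · simpa using h2
    · -- unmarked in-grid neighbour: mark it, enqueue it, bump the counter
      have hmf : m (cur.1 + pos.1) (cur.2 + pos.2) = false := by
        simpa using hmk
      have hdy : pvDist k (cur.1 + pos.1, cur.2 + pos.2) = d + 1 := by
        rcases hy with h | h
        · exact h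
        · exact absurd ((hm _ _ ⟨hg1, hg2, hg3, hg4⟩).mpr (Or.inl h)) hmk
      have hyF : (cur.1 + pos.1, cur.2 + pos.2) ∉ F :=
        fun hmem => hmk ((hm _ _ ⟨hg1, hg2, hg3, hg4⟩).mpr (Or.inr hmem))
      refine ⟨[(cur.1 + pos.1, cur.2 + pos.2)],
        pvUpd m (cur.1 + pos.1) (cur.2 + pos.2), size + 1, ?_, ?_, ?_, ?_, ?_, by simp⟩
      · unfold pvVisit1
        rw [if_pos ⟨by omega, by omega, by omega, by omega⟩]
        simp only []
        rw [hget, if_neg hmk, if_pos rfl,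
          pvSetCell_grid (2*k-1).toNat m _ _ (by omega) (by omega) (by omega) (by omega)]
        simp
      · intro p hp
        rcases List.mem_append.mp hp with h1 | h2
        · exact hF p h1
        · rw [List.mem_singleton.mp h2]
          exact ⟨hdy, ⟨hg1, hg2, hg3, hg4⟩⟩
      · simp only [List.nodup_append, List.nodup_singleton, true_and]
        refine ⟨hnd, ?_⟩
        intro a ha y hy2 hay
        rw [hay, List.mem_singleton.mp hy2] at ha
        exact hyF ha
      · intro i j hgij
        unfold pvUpd
        by_cases hij : i = cur.1 + pos.1 ∧ j = cur.2 + pos.2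
        · rw [if_pos hij]
          simp only [true_iff]
          exact Or.inr (List.mem_append.mpr (Or.inr (by simp [hij.1, hij.2])))
        · rw [if_neg hij]
          rw [hm i j hgij]
          constructor
          · rintro (h1 | h2)
            · exact Or.inl h1
            · exact Or.inr (List.mem_append.mpr (Or.inl h2))
          · rintro (h1 | h2)
            · exact Or.inl h1
            · rcases List.mem_append.mp h2 with h3 | h4
              · exact Or.inr h3
              · exact absurd ⟨congrArg Prod.fst (List.mem_singleton.mp h4),
                  congrArg Prod.snd (List.mem_singleton.mp h4)⟩ hij
      · rw [pvCnt_upd (2*k-1).toNat m _ _ (by omega) (by omega) (by omega) (by omega) hmf]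
        omega
  · -- neighbour outside the grid: the range check fails, state unchanged
    refine ⟨[], m, size, ?_, by simpa using hF, by simpa using hnd, by simpa using hm, hsz,
      fun h => absurd h hg⟩
    unfold pvVisit1
    rw [if_neg]
    · simp
    · intro hguard
      exact hg ⟨by omega, by omega, by omega, by omega⟩

theorem pvVisit_spec (k : Int) (hk : 1 ≤ k) (d : Int) (F : List (Int × Int))
    (m : Int → Int → Bool) (size : Int) (q : List (Option (Int × Int))) (cur : Int × Int)
    (hF : ∀ p ∈ F, pvDist k p = d + 1 ∧ pvInGrid k p) (hnd : F.Nodup)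
    (hm : ∀ i j : Int, pvInGrid k (i, j) → (m i j = true ↔ pvDist k (i, j) ≤ d ∨ (i, j) ∈ F))
    (hsz : size = pvCnt (2*k-1).toNat m)
    (hcur : pvDist k cur = d) :
    ∃ (new : List (Int × Int)) (m2 : Int → Int → Bool) (size2 : Int),
      pvVisit (2*k-1) (pvGrid (2*k-1).toNat m, q, size) cur
        = (pvGrid (2*k-1).toNat m2, q ++ new.map some, size2) ∧
      (∀ p ∈ F ++ new, pvDist k p = d + 1 ∧ pvInGrid k p) ∧ (F ++ new).Nodup ∧
      (∀ i j : Int, pvInGrid k (i, j) → (m2 i j = true ↔ pvDist k (i, j) ≤ d ∨ (i, j) ∈ F ++ new)) ∧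
      size2 = pvCnt (2*k-1).toNat m2 ∧
      (∀ o ∈ pvPositions, pvInGrid k (cur.1 + o.1, cur.2 + o.2) →
        pvDist k (cur.1 + o.1, cur.2 + o.2) = d + 1 → (cur.1 + o.1, cur.2 + o.2) ∈ F ++ new) := by
  have hadj : ∀ o ∈ pvPositions,
      pvDist k (cur.1 + o.1, cur.2 + o.2) = d + 1 ∨ pvDist k (cur.1 + o.1, cur.2 + o.2) ≤ d := by
    intro o ho
    rcases pvAdj_dist k cur o ho with h | h
    · left; rw [h, hcur]
    · right; omega
  obtain ⟨n1, m1, s1, e1, hF1, hnd1, hm1, hs1, hg1⟩ :=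
    pvVisit1_spec k hk d F m size q cur (0, 1) hF hnd hm hsz (hadj _ (by simp [pvPositions]))
  obtain ⟨n2, m2, s2, e2, hF2, hnd2, hm2, hs2, hg2⟩ :=
    pvVisit1_spec k hk d (F ++ n1) m1 s1 (q ++ n1.map some) cur (0, -1) hF1 hnd1 hm1 hs1
      (hadj _ (by simp [pvPositions]))
  obtain ⟨n3, m3, s3, e3, hF3, hnd3, hm3, hs3, hg3⟩ :=
    pvVisit1_spec k hk d ((F ++ n1) ++ n2) m2 s2 ((q ++ n1.map some) ++ n2.map some) cur (1, 0)
      hF2 hnd2 hm2 hs2 (hadj _ (by simp [pvPositions]))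
  obtain ⟨n4, m4, s4, e4, hF4, hnd4, hm4, hs4, hg4⟩ :=
    pvVisit1_spec k hk d (((F ++ n1) ++ n2) ++ n3) m3 s3
      (((q ++ n1.map some) ++ n2.map some) ++ n3.map some) cur (-1, 0)
      hF3 hnd3 hm3 hs3 (hadj _ (by simp [pvPositions]))
  have hEq : (((F ++ n1) ++ n2) ++ n3) ++ n4 = F ++ (n1 ++ n2 ++ n3 ++ n4) := by
    simp [List.append_assoc]
  refine ⟨n1 ++ n2 ++ n3 ++ n4, m4, s4, ?_, ?_, ?_, ?_, hs4, ?_⟩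
  · unfold pvVisit pvPositions
    simp only [List.foldl_cons, List.foldl_nil]
    rw [e1, e2, e3, e4]
    simp [List.map_append, List.append_assoc]
  · rw [← hEq]; exact hF4
  · rw [← hEq]; exact hnd4
  · intro i j hij
    rw [← hEq]; exact hm4 i j hij
  · intro o ho hgo hdo
    rw [← hEq]
    have hmono12 : ∀ x : Int × Int, x ∈ F ++ n1 → x ∈ (((F ++ n1) ++ n2) ++ n3) ++ n4 := by
      intro x hx
      exact List.mem_append_left _ (List.mem_append_left _ (List.mem_append_left _ hx))
    have hmono23 : ∀ x : Int × Int, x ∈ (F ++ n1) ++ n2 → x ∈ (((F ++ n1) ++ n2) ++ n3) ++ n4 := by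
      intro x hx
      exact List.mem_append_left _ (List.mem_append_left _ hx)
    have hmono34 : ∀ x : Int × Int, x ∈ ((F ++ n1) ++ n2) ++ n3 → x ∈ (((F ++ n1) ++ n2) ++ n3) ++ n4 :=
      fun x hx => List.mem_append_left _ hx
    fin_cases ho
    · exact hmono12 _ (hg1 hgo hdo)
    · exact hmono23 _ (hg2 hgo hdo)
    · exact hmono34 _ (hg3 hgo hdo)
    · exact hg4 hgo hdo

theorem pvLoop_spec (k : Int) (hk : 2 ≤ k) :
    ∀ (fuel : Nat) (d : Nat) (pending fresh : List (Int × Int)) (m : Int → Int → Bool) (size : Int),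
    pvInv k d pending fresh m size →
    pending.length + 1 + (k - 2 - (d : Int)).toNat * ((2*k-1).toNat * (2*k-1).toNat + 1) ≤ fuel →
    pvLoop k (2*k-1) fuel (pvGrid (2*k-1).toNat m)
        (pending.map some ++ [none] ++ fresh.map some) ((d : Int) + 1) size
      = (pvGrid (2*k-1).toNat (fun i j => decide (pvDist k (i, j) ≤ k-1)),
         pvCnt (2*k-1).toNat (fun i j => decide (pvDist k (i, j) ≤ k-1))) := by
  have hk1 : (1 : Int) ≤ k := by omega
  have hn : ((2*k-1).toNat : Int) = 2*k-1 := by omega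
  intro fuel
  induction fuel with
  | zero =>
    intro d pending fresh m size hinv hfuel
    omega
  | succ fuel ih =>
    intro d pending fresh m size hinv hfuel
    obtain ⟨hd, hpend, hfresh, hnd, hm, hcomp, hsz⟩ := hinv
    cases pending with
    | cons p rest =>
      -- process one cell of the current layer
      have hcur : pvDist k p = (d : Int) := hpend p (by simp)
      obtain ⟨new, m2, s2, he, hF2, hnd2, hm2, hs2, hgr⟩ :=
        pvVisit_spec k hk1 (d : Int) fresh m size (rest.map some ++ [none] ++ fresh.map some) p
          hfresh hnd hm hsz hcur
      simp only [List.map_cons, List.cons_append, pvLoop]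
      rw [he]
      have hq : (rest.map some ++ [none] ++ fresh.map some) ++ new.map some
          = rest.map some ++ [none] ++ (fresh ++ new).map some := by
        simp [List.map_append, List.append_assoc]
      rw [hq]
      apply ih d rest (fresh ++ new) m2 s2
      · refine ⟨hd, fun x hx => hpend x (by simp [hx]), hF2, hnd2, hm2, ?_, hs2⟩
        rintro y hdy hgy ⟨o, ho, hnotin, hdx⟩
        by_cases hxp : (y.1 - o.1, y.2 - o.2) = p
        · have hy1 : y = (p.1 + o.1, p.2 + o.2) := by
            have h1 := congrArg Prod.fst hxp
            have h2 := congrArg Prod.snd hxp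
            simp only [] at h1 h2
            obtain ⟨ya, yb⟩ := y
            simp only [Prod.mk.injEq] at h1 h2 ⊢
            constructor <;> omega
          rw [hy1]
          exact hgr o ho (hy1 ▸ hgy) (hy1 ▸ hdy)
        · have hnot2 : (y.1 - o.1, y.2 - o.2) ∉ p :: rest := by
            intro hmem
            rcases List.mem_cons.mp hmem with h1 | h1
            · exact hxp h1
            · exact hnotin h1
          exact List.mem_append_left _ (hcomp y hdy hgy ⟨o, ho, hnot2, hdx⟩)
      · simp only [List.length_cons] at hfuel
        omega
    | nil =>
      -- the layer is exhausted: pop the sentinel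
      have hchar : ∀ y, pvInGrid k y → (y ∈ fresh ↔ pvDist k y = (d : Int) + 1) := by
        intro y hgy
        constructor
        · exact fun hmem => (hfresh y hmem).1
        · intro hdy
          obtain ⟨o, ho, hox⟩ := pvStep_toward k y ((d : Int) + 1) (by omega) hdy
          exact hcomp y hdy hgy ⟨o, ho, by simp, by omega⟩
      simp only [List.map_nil, List.nil_append, List.singleton_append, pvLoop]
      by_cases hlast : (d : Int) = k - 2
      · rw [if_pos (by omega : (d : Int) + 1 + 1 = k)]
        have hmm : ∀ i j : Int, 0 ≤ i → i < (2*k-1).toNat → 0 ≤ j → j < (2*k-1).toNat →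
            m i j = (fun i j => decide (pvDist k (i, j) ≤ k-1)) i j := by
          intro i j h1 h2 h3 h4
          have hgij : pvInGrid k (i, j) := ⟨by omega, by omega, by omega, by omega⟩
          cases hb : m i j
          · have hnot := hb ▸ (hm i j hgij)
            simp only [Bool.false_eq_true, false_iff, not_or] at hnot
            have h5 : (i, j) ∉ fresh := hnot.2
            have h6 : ¬ pvDist k (i, j) ≤ (d : Int) := hnot.1
            have h7 : pvDist k (i, j) ≠ (d : Int) + 1 := fun hq => h5 ((hchar (i, j) hgij).mpr hq)
            symm
            simp only [decide_eq_false_iff_not]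
            omega
          · have hyes := (hm i j hgij).mp hb
            symm
            simp only [decide_eq_true_eq]
            rcases hyes with h5 | h5
            · omega
            · have := (hfresh _ h5).1
              omega
        rw [pvGrid_congr _ _ _ hmm, hsz, pvCnt_congr _ _ _ hmm]
      · rw [if_neg (by omega)]
        have hdk3 : (d : Int) ≤ k - 3 := by omega
        have hne : ((k-1) - ((d : Int) + 1), k-1) ∈ fresh := by
          apply (hchar _ ?_).mpr
          · simp only [pvDist]
            omega
          · exact ⟨by omega, by omega, by omega, by omega⟩
        cases fresh with
        | nil => simp at hne
        | cons f0 ftail =>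
          have hm' : ∀ i j : Int, pvInGrid k (i, j) →
              (m i j = true ↔ pvDist k (i, j) ≤ (d : Int) + 1 ∨ (i, j) ∈ ([] : List (Int × Int))) := by
            intro i j hij
            rw [hm i j hij]
            constructor
            · rintro (h1 | h1)
              · exact Or.inl (by omega)
              · exact Or.inl (by rw [(hfresh _ h1).1])
            · rintro (h1 | h1)
              · by_cases h2 : pvDist k (i, j) ≤ (d : Int)
                · exact Or.inl h2
                · exact Or.inr ((hchar (i, j) hij).mpr (by omega))
              · simp at h1
          have hcur : pvDist k f0 = (d : Int) + 1 := (hfresh f0 (by simp)).1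
          obtain ⟨new, m2, s2, he, hF2, hnd2, hm2, hs2, hgr⟩ :=
            pvVisit_spec k hk1 ((d : Int) + 1) [] m size (ftail.map some ++ [none]) f0
              (by simp) (by simp) hm' hsz hcur
          simp only [List.map_cons, List.cons_append]
          rw [he]
          have hq : (ftail.map some ++ [none]) ++ new.map some
              = ftail.map some ++ [none] ++ new.map some := by
            simp [List.append_assoc]
          rw [hq]
          have hcount : (d : Int) + 1 + 1 = ((d + 1 : Nat) : Int) + 1 := by push_cast; ring
          rw [hcount]
          apply ih (d + 1) ftail new m2 s2
          · refine ⟨by push_cast; omega, ?_, ?_, ?_, ?_, ?_, hs2⟩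
            · intro x hx
              have := (hfresh x (by simp [hx])).1
              push_cast
              omega
            · intro x hx
              have := hF2 x (by simpa using hx)
              push_cast
              exact ⟨by omega, this.2⟩
            · simpa using hnd2
            · intro i j hij
              have := hm2 i j hij
              push_cast
              simpa using this
            · rintro y hdy hgy ⟨o, ho, hnotin, hdx⟩
              have hdx' : pvDist k (y.1 - o.1, y.2 - o.2) = (d : Int) + 1 := by push_cast at hdx; omega
              have hgx : pvInGrid k (y.1 - o.1, y.2 - o.2) :=
                pvInGrid_of_dist_le k hk1 _ (by omega)
              have hxf : (y.1 - o.1, y.2 - o.2) ∈ f0 :: ftail := (hchar _ hgx).mpr hdx'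
              have hxf0 : (y.1 - o.1, y.2 - o.2) = f0 := by
                rcases List.mem_cons.mp hxf with h1 | h1
                · exact h1
                · exact absurd h1 hnotin
              have hy1 : y = (f0.1 + o.1, f0.2 + o.2) := by
                have h1 := congrArg Prod.fst hxf0
                have h2 := congrArg Prod.snd hxf0
                simp only [] at h1 h2
                obtain ⟨ya, yb⟩ := y
                simp only [Prod.mk.injEq] at h1 h2 ⊢
                constructor <;> omega
              have hdy' : pvDist k (f0.1 + o.1, f0.2 + o.2) = (d : Int) + 1 + 1 := by
                rw [← hy1]
                push_cast at hdy
                omega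
              have := hgr o ho (hy1 ▸ hgy) hdy'
              rw [hy1]
              simpa using this
          · have hlen : (f0 :: ftail).length ≤ (2*k-1).toNat * (2*k-1).toNat :=
              pvLength_le_sq k (f0 :: ftail) hnd (fun x hx => (hfresh x hx).2)
            simp only [List.length_cons] at hlen
            have hsplit : (k - 2 - (d : Int)).toNat * ((2*k-1).toNat * (2*k-1).toNat + 1)
                = (k - 2 - ((d + 1 : Nat) : Int)).toNat * ((2*k-1).toNat * (2*k-1).toNat + 1)
                  + ((2*k-1).toNat * (2*k-1).toNat + 1) := by
              have h1 : (k - 2 - (d : Int)).toNat = (k - 2 - ((d + 1 : Nat) : Int)).toNat + 1 := by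
                push_cast
                omega
              rw [h1, Nat.add_mul, one_mul]
            simp only [List.length_nil] at hfuel
            omega

theorem pvInit_inv (k : Int) (hk : 2 ≤ k) :
    pvInv k 0 [(k-1, k-1)] [] (pvUpd (fun _ _ => false) (k-1) (k-1)) 1 := by
  have hn : ((2*k-1).toNat : Int) = 2*k-1 := by omega
  refine ⟨by push_cast; omega, ?_, by simp, by simp, ?_, ?_, ?_⟩
  · intro p hp
    rw [List.mem_singleton.mp hp]
    simp [pvDist]
  · intro i j hij
    unfold pvUpd
    by_cases hij2 : i = k-1 ∧ j = k-1
    · rw [if_pos hij2]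
      simp only [true_iff]
      left
      simp [pvDist, hij2.1, hij2.2]
    · rw [if_neg hij2]
      simp only [Bool.false_eq_true, false_iff, not_or]
      constructor
      · intro h1
        have := (pvDist_eq_zero k (i, j)).mp (by push_cast at h1; omega)
        exact hij2 ⟨congrArg Prod.fst this, congrArg Prod.snd this⟩
      · simp
  · rintro y hdy hgy ⟨o, ho, hnotin, hdx⟩
    exfalso
    apply hnotin
    rw [List.mem_singleton]
    exact (pvDist_eq_zero k _).mp (by push_cast at hdx; omega)
  · rw [pvCnt_upd _ _ _ _ (by omega) (by omega) (by omega) (by omega) rfl, pvCnt_false]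
    norm_num

theorem pvFuel_ok (k : Int) (hk : 2 ≤ k) :
    [((k:Int)-1, (k:Int)-1)].length + 1
      + (k - 2 - ((0 : Nat) : Int)).toNat * ((2*k-1).toNat * (2*k-1).toNat + 1)
      ≤ (4*k*k*k + 2*k + 8).toNat := by
  have hn : ((2*k-1).toNat : Int) = 2*k-1 := by omega
  have hT : (((k-2).toNat : Int)) = k - 2 := by omega
  have hpos : (0 : Int) ≤ 4*k*k*k + 2*k + 8 := by nlinarith [sq_nonneg k, mul_pos (mul_pos (by omega : (0:Int) < k) (by omega : (0:Int) < k)) (by omega : (0:Int) < k)]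
  simp only [List.length_singleton, Nat.cast_zero, sub_zero]
  rw [Int.le_toNat hpos]
  push_cast
  rw [hT, hn]
  nlinarith [sq_nonneg k]

theorem get_service_area_spec : Claim_equal_get_service_area := by
  intro k hdom hpre
  unfold Spec_get_service_area
  unfold Pre_get_service_area at hpre
  by_cases hk1 : k = 1
  · subst hk1
    decide
  · have hk : 2 ≤ k := by omega
    rw [pvAlt_eq k (by omega)]
    unfold get_service_area
    simp only []
    rw [if_pos hpre]
    rw [pvReplicate_eq_grid, pvSetCell_grid _ _ _ _ (by omega) (by omega) (by omega) (by omega)]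
    have hq : [some ((k:Int)-1, (k:Int)-1), (none : Option (Int × Int))]
        = ([((k:Int)-1, (k:Int)-1)].map some) ++ [none] ++ (([] : List (Int × Int)).map some) := by
      simp
    rw [hq]
    exact pvLoop_spec k hk (4*k*k*k + 2*k + 8).toNat 0 [(k-1, k-1)] []
      (pvUpd (fun _ _ => false) (k-1) (k-1)) 1 (pvInit_inv k hk) (pvFuel_ok k hk)
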